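-- pv_equiv track=rewrite | github.com/ANUcybernetics/neon-perceptron | scripts/bench_test.py | make_frame
-- ===== SOURCE A (Python) =====
-- CHANNELS_PER_CHIP = 24
--
-- def make_frame(num_chips, pwm=0):
--     """Build a frame buffer. pwm=0 is dark, pwm=4095 is full bright."""
--     chip = []
--     for i in range(0, CHANNELS_PER_CHIP, 2):
--         a = pwm & 0xFFF
--         b = pwm & 0xFFF
--         chip.append((a >> 4) & 0xFF)
--         chip.append(((a & 0xF) << 4) | ((b >> 8) & 0xF))
--         chip.append(b & 0xFF)
--     return chip * num_chips
-- ===== SOURCE B (Python) =====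
-- CHANNELS_PER_CHIP = 24
--
-- def make_frame(num_chips, pwm=0):
--     """Build a frame buffer. pwm=0 is dark, pwm=4095 is full bright."""
--     p = pwm & 0xFFF
--     triple = [(p >> 4) & 0xFF, ((p & 0xF) << 4) | ((p >> 8) & 0xF), p & 0xFF]
--     return triple * (CHANNELS_PER_CHIP // 2) * num_chips
-- ===== Notes on version B (the rewrite author's own statement) =====
-- stated objective: simpler
-- what changed: Replaces the per-channel loop (which recomputes the masked pwm and the same three bytes 12 times) by computing the three bytes once and building the frame by list replication.
import Mathlib
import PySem

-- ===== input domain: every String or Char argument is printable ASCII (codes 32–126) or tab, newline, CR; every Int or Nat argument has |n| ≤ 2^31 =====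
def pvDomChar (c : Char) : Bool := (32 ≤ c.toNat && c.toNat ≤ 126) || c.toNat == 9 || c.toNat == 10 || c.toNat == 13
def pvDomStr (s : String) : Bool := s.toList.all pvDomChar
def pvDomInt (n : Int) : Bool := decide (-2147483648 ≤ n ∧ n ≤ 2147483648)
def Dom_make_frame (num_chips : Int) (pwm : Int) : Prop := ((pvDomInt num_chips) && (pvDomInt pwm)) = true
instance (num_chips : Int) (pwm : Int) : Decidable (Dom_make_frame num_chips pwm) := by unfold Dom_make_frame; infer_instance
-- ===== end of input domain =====

-- B computes the three frame bytes once and builds the result by list replication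
-- instead of A's per-channel loop; return values proved equal for all inputs.

-- Python's 'list * int' (n ≤ 0 gives []), shared semantic helper for both ports
def pyListMulInt {α : Type} (xs : List α) (n : Int) : List α :=
  (List.replicate n.toNat xs).flatten

-- ===== PORT A =====
def make_frame (num_chips : Int) (pwm : Int) : List Int :=
  let chip := (PySem.List.pyRange 0 24 2).foldl (fun chip _i =>
    let a := PySem.Int.band pwm 0xFFF
    let b := PySem.Int.band pwm 0xFFF
    ((chip ++ [PySem.Int.band (a >>> 4) 0xFF])
      ++ [PySem.Int.bor ((PySem.Int.band a 0xF) <<< 4) (PySem.Int.band (b >>> 8) 0xF)])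
      ++ [PySem.Int.band b 0xFF]) []
  pyListMulInt chip num_chips

-- ===== PORT B =====
def make_frame_alt (num_chips : Int) (pwm : Int) : List Int :=
  let p := PySem.Int.band pwm 0xFFF
  let triple := [PySem.Int.band (p >>> 4) 0xFF,
                 PySem.Int.bor ((PySem.Int.band p 0xF) <<< 4) (PySem.Int.band (p >>> 8) 0xF),
                 PySem.Int.band p 0xFF]
  pyListMulInt (pyListMulInt triple (PySem.Int.floordiv 24 2)) num_chips

-- ===== PRECONDITION & SPEC =====
def Spec_make_frame (num_chips : Int) (pwm : Int) (out : List Int) : Prop := out = make_frame_alt num_chips pwm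
instance (num_chips : Int) (pwm : Int) (out : List Int) : Decidable (Spec_make_frame num_chips pwm out) := by unfold Spec_make_frame; infer_instance

-- ===== CLAIM (what is proved, stated in full; the proofs are below) =====
def Claim_equal_make_frame : Prop := ∀ (num_chips : Int) (pwm : Int), Dom_make_frame num_chips pwm → Spec_make_frame num_chips pwm (make_frame num_chips pwm)

-- ===== LEMMAS AND PROOFS =====

-- ===== VERDICT (by name: the statement is the Claim_ definition above) =====
theorem make_frame_spec : Claim_equal_make_frame := by
  intro num_chips pwm _
  show make_frame num_chips pwm = make_frame_alt num_chips pwm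
  simp [make_frame, make_frame_alt, PySem.List.pyRange, PySem.Int.floordiv, pyListMulInt,
        List.replicate, List.range_succ]
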